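-- pv_equiv track=rewrite | github.com/mutant-77/acople | acople/session.py | _tokenize_terms
-- ===== SOURCE A (Python) =====
-- def _escape_fts5_term(term: str) -> str:
--     escaped = term.replace('"', '""')
--     return f'"{escaped}"'
--
-- def _tokenize_terms(text: str, min_len: int = 4) -> str:
--     terms = []
--     current = []
--     for ch in text:
--         if ch.isalnum():
--             current.append(ch)
--         else:
--             word = "".join(current)
--             if len(word) >= min_len:
--                 terms.append(_escape_fts5_term(word))
--             current = []
--     word = "".join(current)
--     if len(word) >= min_len:
--         terms.append(_escape_fts5_term(word))
--     return " OR ".join(terms) if terms else ""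
-- ===== SOURCE B (Python) =====
-- def _escape_fts5_term(term: str) -> str:
--     escaped = term.replace('"', '""')
--     return f'"{escaped}"'
--
-- def _tokenize_terms(text: str, min_len: int = 4) -> str:
--     # Boundary scanner: record each delimiter position and slice the segment
--     # before it; then filter/escape the segments in one comprehension.
--     segs = []
--     start = 0
--     for i, ch in enumerate(text):
--         if not ch.isalnum():
--             segs.append(text[start:i])
--             start = i + 1
--     segs.append(text[start:])
--     terms = [_escape_fts5_term(w) for w in segs if len(w) >= min_len]
--     return " OR ".join(terms)
-- ===== Notes on version B (the rewrite author's own statement) =====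
-- stated objective: alternative
-- what changed: A is a char-by-char state machine that accumulates the current word in a list and flushes it at each delimiter; B records delimiter boundary indices while scanning, slices the segments between consecutive boundaries, and filters/escapes them in a single comprehension.
import Mathlib
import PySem

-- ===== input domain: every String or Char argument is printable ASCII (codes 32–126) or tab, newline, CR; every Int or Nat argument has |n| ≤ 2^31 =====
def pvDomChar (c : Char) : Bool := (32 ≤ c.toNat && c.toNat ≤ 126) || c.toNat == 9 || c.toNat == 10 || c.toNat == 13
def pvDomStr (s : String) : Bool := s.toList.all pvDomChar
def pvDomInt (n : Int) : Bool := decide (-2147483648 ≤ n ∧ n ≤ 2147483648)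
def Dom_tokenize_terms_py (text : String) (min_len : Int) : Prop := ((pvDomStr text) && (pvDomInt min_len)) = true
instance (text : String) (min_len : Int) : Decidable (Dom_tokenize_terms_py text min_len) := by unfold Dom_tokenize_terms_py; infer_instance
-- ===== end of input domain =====

-- B replaces A's char-accumulating state machine by a boundary-index scanner that slices
-- the segments between delimiters and filters/escapes them in one comprehension (objective: alternative).

-- ===== PORT A =====
-- shared helper: _escape_fts5_term (both Pythons define the identical helper)
def escape_fts5_term (term : String) : String :=
  let escaped := PySem.Str.replace term "\"" "\"\""
  "\"" ++ escaped ++ "\""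

-- A's loop: for ch in text, state (terms, current); flush current at each non-alnum char and at the end
def tokATerms (min_len : Int) : List Char → List String → List Char → List String
  | [], terms, current =>
      let word := String.ofList current
      if min_len ≤ (PySem.Str.len word : Int) then terms ++ [escape_fts5_term word] else terms
  | c :: rest, terms, current =>
      if PySem.Chars.isalnum c then
        tokATerms min_len rest terms (current ++ [c])
      else
        let word := String.ofList current
        let terms' := if min_len ≤ (PySem.Str.len word : Int) then terms ++ [escape_fts5_term word] else terms
        tokATerms min_len rest terms' []

def tokenize_terms_py (text : String) (min_len : Int) : String :=
  let terms := tokATerms min_len text.toList [] []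
  if terms ≠ [] then PySem.Str.join " OR " terms else ""

-- ===== PORT B =====
-- B's loop body: for i, ch in enumerate(text): if not ch.isalnum(): segs.append(text[start:i]); start = i+1
def tokBStep (text : List Char) (p : List (List Char) × Int) (ic : Int × Char) : List (List Char) × Int :=
  if PySem.Chars.isalnum ic.2 then p
  else (p.1 ++ [PySem.List.slice text (some p.2) (some ic.1)], ic.1 + 1)

def tokenize_terms_py_alt (text : String) (min_len : Int) : String :=
  let cs := text.toList
  let r := (PySem.List.enumerate cs 0).foldl (tokBStep cs) ([], 0)
  let segs := r.1 ++ [PySem.List.slice cs (some r.2) none]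
  let terms := (segs.filter (fun w => decide (min_len ≤ (PySem.Chars.len w : Int)))).map
      (fun w => escape_fts5_term (String.ofList w))
  PySem.Str.join " OR " terms

-- ===== PRECONDITION & SPEC =====
def Spec_tokenize_terms_py (text : String) (min_len : Int) (out : String) : Prop := out = tokenize_terms_py_alt text min_len
instance (text : String) (min_len : Int) (out : String) : Decidable (Spec_tokenize_terms_py text min_len out) := by unfold Spec_tokenize_terms_py; infer_instance

-- ===== CLAIM (what is proved, stated in full; the proofs are below) =====
def Claim_equal_tokenize_terms_py : Prop := ∀ (text : String) (min_len : Int), Dom_tokenize_terms_py text min_len → Spec_tokenize_terms_py text min_len (tokenize_terms_py text min_len)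

-- ===== LEMMAS AND PROOFS =====

-- the maximal alnum-runs of a char list, including the empty runs A's state machine flushes
def segsOf : List Char → List (List Char)
  | [] => [[]]
  | c :: cs =>
    match segsOf cs with
    | [] => []
    | s :: r => if PySem.Chars.isalnum c then (c :: s) :: r else [] :: s :: r

def consHead (cur : List Char) : List (List Char) → List (List Char)
  | [] => [cur]
  | s :: r => (cur ++ s) :: r

def emitTerm (min_len : Int) (w : List Char) : List String :=
  if min_len ≤ (w.length : Int) then [escape_fts5_term (String.ofList w)] else []

def termsOf (min_len : Int) (segs : List (List Char)) : List String :=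
  segs.flatMap (emitTerm min_len)

lemma segsOf_ne_nil : ∀ (cs : List Char), segsOf cs ≠ []
  | [] => by simp [segsOf]
  | c :: cs => by
    have ih := segsOf_ne_nil cs
    rcases h : segsOf cs with _ | ⟨s, r⟩
    · exact absurd h ih
    · simp only [segsOf, h]
      split <;> simp

lemma tokATerms_eq (min_len : Int) :
    ∀ (cs current : List Char) (terms : List String),
      tokATerms min_len cs terms current
        = terms ++ termsOf min_len (consHead current (segsOf cs)) := by
  intro cs
  induction cs with
  | nil =>
    intro current terms
    simp only [tokATerms, segsOf, consHead, termsOf, emitTerm, List.flatMap_cons,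
      List.flatMap_nil, List.append_nil, PySem.Str.len, String.toList_ofList]
    split <;> simp
  | cons c cs ih =>
    intro current terms
    rcases h : segsOf cs with _ | ⟨s, r⟩
    · exact absurd h (segsOf_ne_nil cs)
    by_cases hal : PySem.Chars.isalnum c = true
    · simp only [tokATerms, hal, if_true]
      rw [ih]
      simp [segsOf, h, hal, consHead, termsOf]
    · simp only [tokATerms, hal, Bool.false_eq_true, if_false]
      rw [ih]
      simp only [segsOf, h, hal, Bool.false_eq_true, if_false, consHead, List.nil_append,
        termsOf, List.flatMap_cons, emitTerm, PySem.Str.len, String.toList_ofList]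
      by_cases hc : min_len ≤ (current.length : Int)
      · simp [hc, List.append_assoc]
      · simp [hc]

lemma tokB_fold_eq (text : List Char) :
    ∀ (cs : List Char) (k start : Nat) (segs : List (List Char)),
      text.drop k = cs → start ≤ k →
      (((PySem.List.enumerate cs (k : Int)).foldl (tokBStep text) (segs, (start : Int))).1
        ++ [PySem.List.slice text
              (some (((PySem.List.enumerate cs (k : Int)).foldl (tokBStep text) (segs, (start : Int))).2)) none])
      = segs ++ consHead ((text.drop start).take (k - start)) (segsOf cs) := by
  intro cs
  induction cs with
  | nil =>
    intro k start segs hdrop hle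
    have hlen : text.length ≤ k := by
      have := List.drop_eq_nil_iff.mp hdrop
      omega
    have htake : (text.drop start).take (k - start) = text.drop start := by
      apply List.take_of_length_le
      simp only [List.length_drop]
      omega
    simp [PySem.List.enumerate_nil, segsOf, consHead, htake,
      PySem.List.slice_from_natCast]
  | cons c cs ih =>
    intro k start segs hdrop hle
    have hk : k < text.length := by
      by_contra h
      have : text.drop k = [] := List.drop_eq_nil_iff.mpr (by omega)
      rw [this] at hdrop; exact absurd hdrop (by simp)
    have hdrop' : text.drop (k + 1) = cs := by
      rw [← List.tail_drop, hdrop]; rfl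
    have hgetk : text[k]'hk = c := by
      have h0 : text[k]? = some c := by
        have h1 : (text.drop k)[0]? = some c := by rw [hdrop]; rfl
        rw [List.getElem?_drop] at h1
        simpa using h1
      rw [List.getElem?_eq_getElem hk] at h0
      exact Option.some.inj h0
    rcases h : segsOf cs with _ | ⟨s, r⟩
    · exact absurd h (segsOf_ne_nil cs)
    rw [PySem.List.enumerate_cons]
    by_cases hal : PySem.Chars.isalnum c = true
    · -- alnum: state unchanged, run grows
      have hstep : tokBStep text (segs, (start : Int)) ((k : Int), c) = (segs, (start : Int)) := by
        simp [tokBStep, hal]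
      have hcast : ((k : Int) + 1) = ((k + 1 : Nat) : Int) := by push_cast; ring
      rw [List.foldl_cons, hstep, hcast, ih (k + 1) start segs hdrop' (by omega)]
      have htake : (text.drop start).take (k + 1 - start)
          = (text.drop start).take (k - start) ++ [c] := by
        have hsub : k + 1 - start = (k - start) + 1 := by omega
        rw [hsub, List.take_add_one]
        have hidx : (text.drop start)[k - start]? = some c := by
          rw [List.getElem?_drop]
          have heq : start + (k - start) = k := by omega
          rw [heq, List.getElem?_eq_getElem hk, hgetk]
        simp [hidx]
      rw [htake]
      simp [segsOf, h, hal, consHead]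
    · -- delimiter: flush segment, start = k+1
      have hstep : tokBStep text (segs, (start : Int)) ((k : Int), c)
          = (segs ++ [PySem.List.slice text (some (start : Int)) (some (k : Int))], (k : Int) + 1) := by
        simp [tokBStep, hal]
      have hcast : ((k : Int) + 1) = ((k + 1 : Nat) : Int) := by push_cast; ring
      rw [List.foldl_cons, hstep, hcast,
        ih (k + 1) (k + 1) (segs ++ [PySem.List.slice text (some (start : Int)) (some (k : Int))]) hdrop' (by omega)]
      rw [PySem.List.slice_natCast]
      simp [segsOf, h, hal, consHead]

lemma filter_map_eq_termsOf (min_len : Int) :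
    ∀ (segs : List (List Char)),
      (segs.filter (fun w => decide (min_len ≤ (PySem.Chars.len w : Int)))).map
          (fun w => escape_fts5_term (String.ofList w))
        = termsOf min_len segs
  | [] => by simp [termsOf]
  | s :: r => by
    have ih := filter_map_eq_termsOf min_len r
    have hT : termsOf min_len (s :: r) = emitTerm min_len s ++ termsOf min_len r := by
      simp [termsOf]
    rw [hT]
    by_cases h : min_len ≤ (s.length : Int)
    · rw [List.filter_cons_of_pos (by simp [h]), List.map_cons, ih]
      simp [emitTerm, h]
    · rw [List.filter_cons_of_neg (by simp [h]), ih]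
      simp [emitTerm, h]

lemma consHead_nil (segs : List (List Char)) (h : segs ≠ []) : consHead [] segs = segs := by
  cases segs with
  | nil => exact absurd rfl h
  | cons s r => simp [consHead]

-- ===== VERDICT (by name: the statement is the Claim_ definition above) =====
theorem tokenize_terms_py_spec : Claim_equal_tokenize_terms_py := by
  intro text min_len _
  unfold Spec_tokenize_terms_py
  simp only [tokenize_terms_py, tokenize_terms_py_alt]
  have hB := tokB_fold_eq text.toList text.toList 0 0 [] (by simp) (by omega)
  simp only [Nat.cast_zero, List.drop_zero, Nat.sub_zero, List.take_zero, List.nil_append] at hB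
  rw [consHead_nil _ (segsOf_ne_nil _)] at hB
  rw [hB, filter_map_eq_termsOf]
  rw [tokATerms_eq min_len text.toList [] []]
  rw [consHead_nil _ (segsOf_ne_nil _)]
  simp only [List.nil_append]
  split
  · rfl
  · next hne =>
    rw [not_not.mp hne]
    rfl
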